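-- pv_equiv track=rewrite | github.com/KostasEreksonas/Codewars-kata-solutions | 7kyu/Python/two_to_one.py | longest
-- ===== SOURCE A (Python) =====
-- def longest(a1, a2):
--     uniq = []
--     for x in a1:
--         if x not in uniq:
--             uniq.append(x)
--     for x in a2:
--         if x not in uniq:
--             uniq.append(x)
--     uniq.sort()
--     return "".join(uniq)
-- ===== SOURCE B (Python) =====
-- def longest(a1, a2):
--     out = []
--     prev = None
--     for c in sorted(a1 + a2):
--         if c != prev:
--             out.append(c)
--             prev = c
--     return "".join(out)
-- ===== Notes on version B (the rewrite author's own statement) =====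
-- stated objective: alternative
-- what changed: Replaces A's per-character membership scan over the growing uniq list followed by a sort with sorting the concatenation once and collapsing adjacent duplicates in a single linear pass.
import Mathlib
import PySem

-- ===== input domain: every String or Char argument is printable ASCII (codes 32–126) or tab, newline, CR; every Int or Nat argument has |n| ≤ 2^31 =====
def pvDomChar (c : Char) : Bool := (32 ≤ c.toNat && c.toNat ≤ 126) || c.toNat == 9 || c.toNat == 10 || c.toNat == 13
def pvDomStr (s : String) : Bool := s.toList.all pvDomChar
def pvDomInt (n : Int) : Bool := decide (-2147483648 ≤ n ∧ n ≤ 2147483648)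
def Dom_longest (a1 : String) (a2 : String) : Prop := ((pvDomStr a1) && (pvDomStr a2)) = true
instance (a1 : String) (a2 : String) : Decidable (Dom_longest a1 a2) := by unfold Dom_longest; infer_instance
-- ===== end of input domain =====

-- B sorts the concatenation once and collapses adjacent duplicates in one linear pass,
-- an alternative to A's per-character membership scan of the growing uniq list followed by a sort.

-- ===== PORT A =====
-- A: build uniq by first-occurrence dedup (membership scan + append), then sort, then join.
def longest (a1 : String) (a2 : String) : String :=
  let uniq := a1.toList.foldl (fun acc x => if x ∈ acc then acc else acc ++ [x]) []
  let uniq := a2.toList.foldl (fun acc x => if x ∈ acc then acc else acc ++ [x]) uniq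
  String.mk (PySem.List.sorted uniq (fun x => x))

-- ===== PORT B =====
-- one loop step of B: append c when it differs from the previously appended char
def bstep (st : List Char × Option Char) (c : Char) : List Char × Option Char :=
  if some c ≠ st.2 then (st.1 ++ [c], some c) else st

def longest_alt (a1 : String) (a2 : String) : String :=
  let st := (PySem.List.sorted (a1.toList ++ a2.toList) (fun x => x)).foldl bstep ([], none)
  String.mk st.1

-- ===== PRECONDITION & SPEC =====
def Spec_longest (a1 : String) (a2 : String) (out : String) : Prop := out = longest_alt a1 a2
instance (a1 : String) (a2 : String) (out : String) : Decidable (Spec_longest a1 a2 out) := by unfold Spec_longest; infer_instance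

-- ===== CLAIM (what is proved, stated in full; the proofs are below) =====
def Claim_equal_longest : Prop := ∀ (a1 : String) (a2 : String), Dom_longest a1 a2 → Spec_longest a1 a2 (longest a1 a2)

-- ===== LEMMAS AND PROOFS =====

-- A's dedup fold: membership
theorem mem_uniqFold (l : List Char) (acc : List Char) (x : Char) :
    x ∈ l.foldl (fun acc x => if x ∈ acc then acc else acc ++ [x]) acc ↔ x ∈ acc ∨ x ∈ l := by
  induction l generalizing acc with
  | nil => simp
  | cons c t ih =>
    simp only [List.foldl_cons]
    by_cases h : c ∈ acc
    · rw [if_pos h, ih]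
      constructor
      · rintro (ha | ht)
        · exact Or.inl ha
        · exact Or.inr (List.mem_cons_of_mem _ ht)
      · rintro (ha | hc)
        · exact Or.inl ha
        · rcases List.mem_cons.mp hc with rfl | ht
          · exact Or.inl h
          · exact Or.inr ht
    · rw [if_neg h, ih]
      simp [List.mem_append, List.mem_cons]
      tauto

-- A's dedup fold: no duplicates
theorem nodup_uniqFold (l : List Char) (acc : List Char) (h : acc.Nodup) :
    (l.foldl (fun acc x => if x ∈ acc then acc else acc ++ [x]) acc).Nodup := by
  induction l generalizing acc with
  | nil => simpa
  | cons c t ih =>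
    simp only [List.foldl_cons]
    by_cases hc : c ∈ acc
    · rw [if_pos hc]; exact ih _ h
    · rw [if_neg hc]
      refine ih _ ?_
      exact (List.perm_append_comm (l₁ := acc) (l₂ := [c])).nodup_iff.mpr
        (List.nodup_cons.mpr ⟨hc, h⟩)

-- B's loop invariant: over a ≤-sorted list, the accumulated output stays strictly
-- increasing, its elements are ≤ everything still to come, prev is its maximum,
-- and the final output's members are exactly acc's plus the input's.
theorem bloop_invariant (cs : List Char) : ∀ (out : List Char) (prev : Option Char),
    cs.Pairwise (· ≤ ·) →
    out.Pairwise (· < ·) →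
    (∀ a ∈ out, ∀ x ∈ cs, a ≤ x) →
    (prev = none → out = []) →
    (∀ p, prev = some p → p ∈ out ∧ ∀ a ∈ out, a ≤ p) →
    ((cs.foldl bstep (out, prev)).1.Pairwise (· < ·)) ∧
    (∀ x, x ∈ (cs.foldl bstep (out, prev)).1 ↔ x ∈ out ∨ x ∈ cs) := by
  induction cs with
  | nil =>
    intro out prev _ hout _ _ _
    exact ⟨hout, by simp⟩
  | cons c t ih =>
    intro out prev hcs hout hcross hnone hsome
    rcases List.pairwise_cons.mp hcs with ⟨hct, ht⟩
    simp only [List.foldl_cons]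
    by_cases hne : some c ≠ prev
    · -- append branch
      rw [show bstep (out, prev) c = (out ++ [c], some c) from by simp [bstep, hne]]
      have hale : ∀ a ∈ out, a ≤ c := fun a ha => hcross a ha c (List.mem_cons_self)
      have halt : ∀ a ∈ out, a < c := by
        intro a ha
        rcases prev with _ | p
        · rw [hnone rfl] at ha; cases ha
        · rcases hsome p rfl with ⟨hpmem, hple⟩
          have hpc : p ≤ c := hcross p hpmem c (List.mem_cons_self)
          refine lt_of_le_of_ne (hale a ha) ?_
          rintro rfl
          exact hne (congrArg some (le_antisymm hpc (hple a ha))).symm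
      have hout' : (out ++ [c]).Pairwise (· < ·) := by
        rw [List.pairwise_append]
        exact ⟨hout, List.pairwise_singleton _ _, fun a ha b hb => by
          rcases List.mem_singleton.mp hb with rfl; exact halt a ha⟩
      have hcross' : ∀ a ∈ out ++ [c], ∀ x ∈ t, a ≤ x := by
        intro a ha x hx
        rcases List.mem_append.mp ha with ha | ha
        · exact hcross a ha x (List.mem_cons_of_mem _ hx)
        · rcases List.mem_singleton.mp ha with rfl; exact hct x hx
      have hsome' : ∀ p, (some c : Option Char) = some p → p ∈ out ++ [c] ∧ ∀ a ∈ out ++ [c], a ≤ p := by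
        intro p hp
        cases Option.some.inj hp
        refine ⟨List.mem_append.mpr (Or.inr (List.mem_singleton.mpr rfl)), ?_⟩
        intro a ha
        rcases List.mem_append.mp ha with ha | ha
        · exact hale a ha
        · rcases List.mem_singleton.mp ha with rfl; exact le_rfl
      rcases ih (out ++ [c]) (some c) ht hout' hcross' (by intro h; cases h) hsome' with ⟨hp, hm⟩
      refine ⟨hp, fun x => ?_⟩
      rw [hm x]
      simp [List.mem_append, List.mem_cons]
      tauto
    · -- skip branch: prev = some c, so c already last appended
      rw [ne_eq, not_not] at hne
      rw [show bstep (out, prev) c = (out, prev) from by simp [bstep, hne]]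
      have hcmem : c ∈ out := (hsome c hne.symm).1
      have hcross' : ∀ a ∈ out, ∀ x ∈ t, a ≤ x :=
        fun a ha x hx => hcross a ha x (List.mem_cons_of_mem _ hx)
      have hsome' : ∀ p, prev = some p → p ∈ out ∧ ∀ a ∈ out, a ≤ p := hsome
      rcases ih out prev ht hout hcross' hnone hsome' with ⟨hp, hm⟩
      refine ⟨hp, fun x => ?_⟩
      rw [hm x]
      simp only [List.mem_cons]
      constructor
      · rintro (h | h)
        · exact Or.inl h
        · exact Or.inr (Or.inr h)
      · rintro (h | rfl | h)
        · exact Or.inl h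
        · exact Or.inl hcmem
        · exact Or.inr h

-- the two result lists coincide
theorem lists_eq (a1 a2 : String) :
    PySem.List.sorted
      (a2.toList.foldl (fun acc x => if x ∈ acc then acc else acc ++ [x])
        (a1.toList.foldl (fun acc x => if x ∈ acc then acc else acc ++ [x]) [])) (fun x => x)
    = ((PySem.List.sorted (a1.toList ++ a2.toList) (fun x => x)).foldl bstep ([], none)).1 := by
  set l := a1.toList ++ a2.toList with hl
  set uniq := a2.toList.foldl (fun acc x => if x ∈ acc then acc else acc ++ [x])
      (a1.toList.foldl (fun acc x => if x ∈ acc then acc else acc ++ [x]) []) with huniq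
  set r := ((PySem.List.sorted l (fun x => x)).foldl bstep ([], none)).1 with hr
  have hsortp : (PySem.List.sorted l (fun x => x)).Pairwise (fun a b => a ≤ b) :=
    PySem.List.sorted_pairwise l (fun x => x)
  have hinv := bloop_invariant (PySem.List.sorted l (fun x => x)) [] none hsortp
      (List.Pairwise.nil) (by simp) (fun _ => rfl) (by intro p h; cases h)
  rcases hinv with ⟨hrp, hrm⟩
  have hrnodup : r.Nodup := List.Pairwise.imp (fun h => ne_of_lt h) hrp
  have huniqmem : ∀ x, x ∈ uniq ↔ x ∈ l := by
    intro x
    rw [huniq, mem_uniqFold, mem_uniqFold]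
    simp [hl, List.mem_append]
  have huniqnodup : uniq.Nodup := nodup_uniqFold _ _ (nodup_uniqFold _ _ List.nodup_nil)
  have hperm : r.Perm uniq := by
    rw [List.perm_ext_iff_of_nodup hrnodup huniqnodup]
    intro x
    rw [huniqmem x, hr, hrm x]
    simp [PySem.List.mem_sorted]
  exact PySem.List.sorted_eq_of_perm_of_pairwise_lt uniq r (fun x => x) hperm hrp

-- ===== VERDICT (by name: the statement is the Claim_ definition above) =====
theorem longest_spec : Claim_equal_longest := by
  intro a1 a2 _
  unfold Spec_longest longest longest_alt
  exact congrArg String.mk (lists_eq a1 a2)
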